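-- pv_equiv track=rewrite | github.com/mirotorch/CzechTopic | src/similarity_inference.py | expand_subword_highlights
-- ===== SOURCE A (Python) =====
-- def expand_subword_highlights(binary_preds, tokens):
--     fixed_preds = list(binary_preds)
--     for i in range(1, len(tokens)):
--         if tokens[i].startswith("##") and fixed_preds[i-1] == 1:
--             fixed_preds[i] = 1
--     for i in range(len(tokens) - 2, -1, -1):
--         if tokens[i+1].startswith("##") and fixed_preds[i+1] == 1:
--             fixed_preds[i] = 1
--     return fixed_preds
-- ===== SOURCE B (Python) =====
-- def expand_subword_highlights(binary_preds, tokens):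
--     # One pass computing a group id per token (a new group at index 0 and at
--     # every token not starting with "##"), then mark groups containing a 1.
--     gid = []
--     g = 0
--     for i, t in enumerate(tokens):
--         if i > 0 and not t.startswith("##"):
--             g += 1
--         gid.append(g)
--     hot = {gid[i] for i in range(len(tokens)) if binary_preds[i] == 1}
--     return [1 if i < len(tokens) and gid[i] in hot else p
--             for i, p in enumerate(binary_preds)]
-- ===== Notes on version B (the rewrite author's own statement) =====
-- stated objective: alternative
-- what changed: Replaces A's two directional propagation passes (forward then backward over mutable state) with a group-id labelling pass plus a set of group ids containing a 1, then a single per-index map.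
-- outside the precondition, e.g. on expand_subword_highlights([0], ['a', 'b']): A returns [0], B raises IndexError
import Mathlib
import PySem

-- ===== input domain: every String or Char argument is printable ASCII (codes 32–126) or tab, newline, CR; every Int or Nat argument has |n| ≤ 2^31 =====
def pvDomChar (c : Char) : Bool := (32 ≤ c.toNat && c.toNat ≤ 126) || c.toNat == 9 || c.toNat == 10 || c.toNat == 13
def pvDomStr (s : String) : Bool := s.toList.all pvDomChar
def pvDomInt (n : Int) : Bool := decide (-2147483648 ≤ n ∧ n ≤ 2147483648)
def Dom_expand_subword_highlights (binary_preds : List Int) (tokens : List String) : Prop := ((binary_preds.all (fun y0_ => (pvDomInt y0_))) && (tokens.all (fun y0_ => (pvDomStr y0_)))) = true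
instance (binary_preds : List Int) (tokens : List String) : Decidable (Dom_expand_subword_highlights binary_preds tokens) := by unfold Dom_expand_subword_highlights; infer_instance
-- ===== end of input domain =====

-- B replaces A's forward+backward propagation passes with a group-id labelling
-- pass and a set of group ids containing a 1 (objective: alternative, same cost).


-- ===== PORT A =====
-- forward-loop body: if tokens[i].startswith("##") and fixed_preds[i-1] == 1: fixed_preds[i] = 1
def pvFwdStep (tokens : List String) (fp : List Int) (i : Nat) : List Int :=
  if PySem.Str.startswith (tokens.getD i "") "##" && (fp.getD (i - 1) 0 == 1) then fp.set i 1 else fp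

-- backward-loop body: if tokens[i+1].startswith("##") and fixed_preds[i+1] == 1: fixed_preds[i] = 1
def pvBwdStep (tokens : List String) (fp : List Int) (i : Nat) : List Int :=
  if PySem.Str.startswith (tokens.getD (i + 1) "") "##" && (fp.getD (i + 1) 0 == 1) then fp.set i 1 else fp

def expand_subword_highlights (binary_preds : List Int) (tokens : List String) : List Int :=
  -- fixed_preds = list(binary_preds); for i in range(1, len(tokens)): …
  let fp1 := (List.range' 1 (tokens.length - 1)).foldl (pvFwdStep tokens) binary_preds
  -- for i in range(len(tokens) - 2, -1, -1): …
  ((List.range (tokens.length - 1)).reverse).foldl (pvBwdStep tokens) fp1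

-- ===== PORT B =====
-- the loop 'for i, t in enumerate(tokens): if i > 0 and not t.startswith("##"): g += 1; gid.append(g)'
def pvGid : Nat → Int → List String → List Int
  | _, _, [] => []
  | i, g, t :: rest =>
    let g' := if decide (i > 0) && !(PySem.Str.startswith t "##") then g + 1 else g
    g' :: pvGid (i + 1) g' rest

def expand_subword_highlights_alt (binary_preds : List Int) (tokens : List String) : List Int :=
  let gid := pvGid 0 0 tokens
  -- hot = {gid[i] for i in range(len(tokens)) if binary_preds[i] == 1}
  let hot := (List.range tokens.length).foldl
    (fun (s : PySem.Set Int) i =>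
      if binary_preds.getD i 0 == 1 then PySem.Set.add s (gid.getD i 0) else s)
    PySem.Set.empty
  -- [1 if i < len(tokens) and gid[i] in hot else p for i, p in enumerate(binary_preds)]
  (PySem.List.enumerate binary_preds).map (fun p =>
    if decide (p.1 < (tokens.length : Int)) && PySem.Set.contains hot (gid.getD p.1.toNat 0) then 1 else p.2)

-- ===== PRECONDITION & SPEC =====
-- Pre_ excludes inputs where tokens is longer than binary_preds: there A's behaviour depends on
-- token content (it raises IndexError mid-loop on a "##" piece past the predictions, and otherwise
-- returns an accidental partial result), and B raises IndexError while building its group set.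
def Pre_expand_subword_highlights (binary_preds : List Int) (tokens : List String) : Prop :=
  tokens.length ≤ binary_preds.length
instance (binary_preds : List Int) (tokens : List String) : Decidable (Pre_expand_subword_highlights binary_preds tokens) := by unfold Pre_expand_subword_highlights; infer_instance

def pvWitness_expand_subword_highlights : List Int × List String := ([1, 0, 0], ["ab", "##b", "cd"])

def Spec_expand_subword_highlights (binary_preds : List Int) (tokens : List String) (out : List Int) : Prop := out = expand_subword_highlights_alt binary_preds tokens
instance (binary_preds : List Int) (tokens : List String) (out : List Int) : Decidable (Spec_expand_subword_highlights binary_preds tokens out) := by unfold Spec_expand_subword_highlights; infer_instance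

-- ===== CLAIM (what is proved, stated in full; the proofs are below) =====
def Claim_equal_expand_subword_highlights : Prop := ∀ (binary_preds : List Int) (tokens : List String), Dom_expand_subword_highlights binary_preds tokens → Pre_expand_subword_highlights binary_preds tokens → Spec_expand_subword_highlights binary_preds tokens (expand_subword_highlights binary_preds tokens)

-- ===== LEMMAS AND PROOFS =====

-- token i is a "##" continuation piece
def isCont (tokens : List String) (i : Nat) : Bool := PySem.Str.startswith (tokens.getD i "") "##"

-- forward-reachability of a 1 through a chain of "##" pieces ending at j
def fch (bp : List Int) (tk : List String) : Nat → Bool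
  | 0 => bp.getD 0 0 == 1
  | j + 1 => (bp.getD (j + 1) 0 == 1) || (isCont tk (j + 1) && fch bp tk j)

-- backward-reachability: some position right of j, linked by "##" pieces, is forward-1
def bch (bp : List Int) (tk : List String) (j : Nat) : Bool :=
  if h : j + 1 < tk.length then isCont tk (j + 1) && (fch bp tk (j + 1) || bch bp tk (j + 1))
  else false
termination_by tk.length - j

theorem getD_set (l : List Int) (i j : Nat) (v : Int) :
    (l.set i v).getD j 0 = if i = j ∧ j < l.length then v else l.getD j 0 := by
  simp only [List.getD_eq_getElem?_getD, List.getElem?_set]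
  split_ifs with h1 h2 h3 h4 <;> simp_all

theorem bp_one_fch (bp : List Int) (tk : List String) (j : Nat) (h : bp.getD j 0 = 1) :
    fch bp tk j = true := by
  cases j with
  | zero => simp [fch, List.getD_eq_getElem?_getD] at h ⊢; exact h
  | succ j' =>
    simp [fch, List.getD_eq_getElem?_getD] at h ⊢
    exact Or.inl h

theorem bch_lt (bp : List Int) (tk : List String) (j : Nat) (h : bch bp tk j = true) :
    j + 1 < tk.length := by
  by_contra hn
  rw [bch, dif_neg hn] at h
  exact Bool.false_ne_true h

theorem bch_unfold_pos (bp : List Int) (tk : List String) (j : Nat) (h : j + 1 < tk.length) :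
    bch bp tk j = (isCont tk (j + 1) && (fch bp tk (j + 1) || bch bp tk (j + 1))) := by
  rw [bch, dif_pos h]

-- forward fold invariant
theorem fwd_inv (bp : List Int) (tk : List String) (hmn : tk.length ≤ bp.length)
    (t : Nat) (ht : t ≤ tk.length - 1) :
    ((List.range' 1 t).foldl (pvFwdStep tk) bp).length = bp.length ∧
    ∀ j, ((List.range' 1 t).foldl (pvFwdStep tk) bp).getD j 0 =
      if j ≤ t ∧ fch bp tk j then 1 else bp.getD j 0 := by
  induction t with
  | zero =>
    refine ⟨rfl, fun j => ?_⟩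
    simp only [List.range'_zero, List.foldl_nil]
    split
    · rename_i hc
      obtain ⟨hj0, hf⟩ := hc
      interval_cases j
      simpa [fch, List.getD_eq_getElem?_getD] using hf
    · rfl
  | succ t ih =>
    obtain ⟨ihlen, ihget⟩ := ih (by omega)
    rw [List.range'_1_concat, List.foldl_append, List.foldl_cons, List.foldl_nil]
    set F := (List.range' 1 t).foldl (pvFwdStep tk) bp with hF
    have h1t : 1 + t = t + 1 := by omega
    have hFt : F.getD t 0 = if fch bp tk t = true then 1 else bp.getD t 0 := by
      rw [ihget t]; simp
    have hcond : ((F.getD (1 + t - 1) 0 == 1) = true) ↔ fch bp tk t = true := by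
      rw [show 1 + t - 1 = t from by omega, hFt]
      constructor
      · intro hbe
        by_cases hf : fch bp tk t = true
        · exact hf
        · simp [hf] at hbe
          exact absurd (bp_one_fch bp tk t hbe) hf
      · intro hf; simp [hf]
    unfold pvFwdStep
    by_cases hc : (PySem.Str.startswith (tk.getD (1 + t) "") "##" && (F.getD (1 + t - 1) 0 == 1)) = true
    · -- write 1 at position t+1
      rw [if_pos hc]
      obtain ⟨hcs, hcv⟩ := Bool.and_eq_true_iff.mp hc
      have hf : fch bp tk t = true := hcond.mp hcv
      have hisc : isCont tk (t + 1) = true := by rw [← h1t]; exact hcs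
      have hfs : fch bp tk (t + 1) = true := by
        simp [fch, hisc, hf]
      refine ⟨by simpa using ihlen, fun j => ?_⟩
      rw [getD_set, ihget j, ihlen]
      by_cases hj : 1 + t = j ∧ j < bp.length
      · rw [if_pos hj]
        obtain ⟨hj1, _⟩ := hj
        have : fch bp tk j = true := by rw [← hj1, h1t]; exact hfs
        rw [if_pos ⟨by omega, this⟩]
      · rw [if_neg hj]
        have hjne : j ≠ t + 1 := by
          intro he
          exact hj ⟨by omega, by rw [he]; omega⟩
        by_cases hle : j ≤ t ∧ fch bp tk j = true
        · rw [if_pos hle, if_pos ⟨by omega, hle.2⟩]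
        · rw [if_neg hle, if_neg (by
            intro ⟨ha, hb⟩
            exact hle ⟨by omega, hb⟩)]
    · rw [if_neg hc]
      refine ⟨ihlen, fun j => ?_⟩
      rw [ihget j]
      by_cases hjt1 : j = t + 1
      · subst hjt1
        rw [if_neg (fun hx => absurd hx.1 (by omega) : ¬ (t + 1 ≤ t ∧ fch bp tk (t + 1) = true))]
        have hnc : (isCont tk (t + 1) && fch bp tk t) = false := by
          by_contra hx
          rw [Bool.not_eq_false, Bool.and_eq_true_iff] at hx
          exact hc (Bool.and_eq_true_iff.mpr ⟨by rw [h1t]; exact hx.1, hcond.mpr hx.2⟩)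
        have hfc' : fch bp tk (t + 1) = (bp.getD (t + 1) 0 == 1) := by
          simp only [fch, hnc, Bool.or_false]
        by_cases hb : bp.getD (t + 1) 0 = 1
        · rw [if_pos ⟨le_refl _, by rw [hfc']; exact beq_iff_eq.mpr hb⟩]
          simpa [List.getD_eq_getElem?_getD] using hb
        · rw [if_neg]
          intro ⟨_, hx⟩
          rw [hfc'] at hx
          exact hb (by simpa using hx)
      · by_cases hle : j ≤ t ∧ fch bp tk j = true
        · rw [if_pos hle, if_pos ⟨by omega, hle.2⟩]
        · rw [if_neg hle, if_neg (by
            intro ⟨ha, hb⟩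
            exact hle ⟨by omega, hb⟩)]

-- backward fold invariant (processing i = tk.length-2 … t)
theorem bwd_inv (bp : List Int) (tk : List String) (hmn : tk.length ≤ bp.length) (hm : 1 ≤ tk.length)
    (FW : List Int) (hlen : FW.length = bp.length)
    (hFW : ∀ j, FW.getD j 0 = if j < tk.length ∧ fch bp tk j then 1 else bp.getD j 0)
    (d : Nat) (hd : d ≤ tk.length - 1) :
    (((List.range' (tk.length - 1 - d) d).reverse).foldl (pvBwdStep tk) FW).length = bp.length ∧
    ∀ j, (((List.range' (tk.length - 1 - d) d).reverse).foldl (pvBwdStep tk) FW).getD j 0 =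
      if tk.length - 1 - d ≤ j ∧ bch bp tk j then 1 else FW.getD j 0 := by
  induction d with
  | zero =>
    refine ⟨hlen, fun j => ?_⟩
    simp only [List.range'_zero, List.reverse_nil, List.foldl_nil]
    split
    · rename_i hcc
      exact absurd (bch_lt bp tk j hcc.2) (by omega)
    · rfl
  | succ d ih =>
    obtain ⟨ihlen, ihget⟩ := ih (by omega)
    rw [List.range'_succ, List.reverse_cons, List.foldl_append, List.foldl_cons, List.foldl_nil,
      show tk.length - 1 - (d + 1) + 1 = tk.length - 1 - d from by omega]
    set t := tk.length - 1 - (d + 1) with hts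
    have htt : tk.length - 1 - d = t + 1 := by omega
    set G' := (List.range' (tk.length - 1 - d) d).reverse.foldl (pvBwdStep tk) FW with hG'
    have ht1m : t + 1 < tk.length := by omega
    have hG't1 : G'.getD (t + 1) 0 = if bch bp tk (t + 1) = true then 1 else FW.getD (t + 1) 0 := by
      rw [ihget (t + 1)]
      simp [htt]
    have hFW1 : FW.getD (t + 1) 0 = if fch bp tk (t + 1) = true then 1 else bp.getD (t + 1) 0 := by
      rw [hFW (t + 1)]
      simp [ht1m]
    have hcond_iff : ((G'.getD (t + 1) 0 == 1) = true) ↔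
        (fch bp tk (t + 1) = true ∨ bch bp tk (t + 1) = true) := by
      constructor
      · intro hbe
        by_cases hbch : bch bp tk (t + 1) = true
        · exact Or.inr hbch
        · by_cases hfch : fch bp tk (t + 1) = true
          · exact Or.inl hfch
          · rw [hG't1, if_neg hbch, hFW1, if_neg hfch] at hbe
            exact Or.inl (bp_one_fch bp tk (t + 1) (beq_iff_eq.mp hbe))
      · intro h
        by_cases hbch : bch bp tk (t + 1) = true
        · rw [hG't1, if_pos hbch]; rfl
        · have hfch : fch bp tk (t + 1) = true := h.resolve_right hbch
          rw [hG't1, if_neg hbch, hFW1, if_pos hfch]; rfl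
    have hbch_t : bch bp tk t =
        (isCont tk (t + 1) && (fch bp tk (t + 1) || bch bp tk (t + 1))) :=
      bch_unfold_pos bp tk t ht1m
    unfold pvBwdStep
    by_cases hc : (PySem.Str.startswith (tk.getD (t + 1) "") "##" && (G'.getD (t + 1) 0 == 1)) = true
    · rw [if_pos hc]
      obtain ⟨hcs, hcv⟩ := Bool.and_eq_true_iff.mp hc
      have hbt : bch bp tk t = true := by
        rw [hbch_t]
        refine Bool.and_eq_true_iff.mpr ⟨hcs, ?_⟩
        rcases hcond_iff.mp hcv with hl | hr
        · simp [hl]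
        · simp [hr]
      refine ⟨by simpa using ihlen, fun j => ?_⟩
      rw [getD_set, ihget j, ihlen, htt]
      by_cases hj : t = j ∧ j < bp.length
      · rw [if_pos hj, if_pos ⟨by omega, hj.1 ▸ hbt⟩]
      · rw [if_neg hj]
        have hjne : j ≠ t := by
          intro he
          exact hj ⟨he.symm, by rw [he]; omega⟩
        by_cases hle : t + 1 ≤ j ∧ bch bp tk j = true
        · rw [if_pos hle, if_pos ⟨by omega, hle.2⟩]
        · rw [if_neg hle, if_neg (by
            intro ⟨ha, hb⟩
            exact hle ⟨by omega, hb⟩)]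
    · rw [if_neg hc]
      have hbt : bch bp tk t = false := by
        rw [hbch_t]
        by_contra hx
        rw [Bool.not_eq_false, Bool.and_eq_true_iff] at hx
        exact hc (Bool.and_eq_true_iff.mpr ⟨hx.1, hcond_iff.mpr (by
          rcases Bool.or_eq_true_iff.mp hx.2 with hl | hr
          · exact Or.inl hl
          · exact Or.inr hr)⟩)
      refine ⟨ihlen, fun j => ?_⟩
      rw [ihget j, htt]
      by_cases hjt : j = t
      · subst hjt
        rw [if_neg (fun hx => absurd hx.1 (by omega) : ¬ (t + 1 ≤ t ∧ bch bp tk t = true)),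
          if_neg (by
            intro ⟨_, hx⟩
            rw [hbt] at hx
            exact Bool.false_ne_true hx)]
      · by_cases hle : t + 1 ≤ j ∧ bch bp tk j = true
        · rw [if_pos hle, if_pos ⟨by omega, hle.2⟩]
        · rw [if_neg hle, if_neg (by
            intro ⟨ha, hb⟩
            exact hle ⟨by omega, hb⟩)]

-- gid facts
theorem pvGid_pos (xs : List String) (g : Int) (i : Nat) (h : 1 ≤ i) :
    pvGid i g xs = pvGid 1 g xs := by
  induction xs generalizing i g with
  | nil => rfl
  | cons x xs ih =>
    simp only [pvGid, decide_eq_true (Nat.lt_of_lt_of_le Nat.zero_lt_one h), decide_eq_true Nat.zero_lt_one, Bool.true_and]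
    rw [ih _ _ (by omega), ih _ 2 (by omega)]

theorem pvGid_getD_zero (x : String) (xs : List String) (g : Int) :
    (pvGid 1 g (x :: xs)).getD 0 0 = if PySem.Str.startswith x "##" then g else g + 1 := by
  simp [pvGid]
  split <;> simp_all

theorem pvGid_succ_pos (xs : List String) (g : Int) (j : Nat) (h : j + 1 < xs.length) :
    (pvGid 1 g xs).getD (j + 1) 0 = (pvGid 1 g xs).getD j 0 +
      (if PySem.Str.startswith (xs.getD (j + 1) "") "##" then 0 else 1) := by
  induction xs generalizing g j with
  | nil => simp at h
  | cons x xs ih =>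
    have hps : pvGid 1 g (x :: xs) =
        (if !(PySem.Str.startswith x "##") then g + 1 else g) ::
          pvGid 1 (if !(PySem.Str.startswith x "##") then g + 1 else g) xs := by
      simp only [pvGid, decide_eq_true Nat.zero_lt_one, Bool.true_and]
      rw [pvGid_pos _ _ 2 (by omega)]
    set g' := if !(PySem.Str.startswith x "##") then g + 1 else g with hg'
    cases j with
    | zero =>
      cases xs with
      | nil => simp at h
      | cons y ys =>
        rw [hps]
        simp only [List.getD_cons_succ, List.getD_cons_zero]
        rw [show (pvGid 1 g' (y :: ys)).getD 0 0 = _ from pvGid_getD_zero y ys g']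
        split <;> simp
    | succ j' =>
      rw [hps]
      simp only [List.getD_cons_succ]
      exact ih g' j' (by simpa using Nat.lt_of_succ_lt_succ h)

theorem pvGid_cons (t : String) (rest : List String) :
    pvGid 0 0 (t :: rest) = 0 :: pvGid 1 0 rest := by
  simp [pvGid]

theorem gid_succ (tk : List String) (j : Nat) (h : j + 1 < tk.length) :
    (pvGid 0 0 tk).getD (j + 1) 0 =
      (pvGid 0 0 tk).getD j 0 + (if isCont tk (j + 1) then 0 else 1) := by
  cases tk with
  | nil => simp at h
  | cons t rest =>
    rw [pvGid_cons]
    cases j with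
    | zero =>
      cases rest with
      | nil => simp at h
      | cons y ys =>
        simp only [List.getD_cons_succ, List.getD_cons_zero]
        rw [show (pvGid 1 0 (y :: ys)).getD 0 0 = _ from pvGid_getD_zero y ys 0]
        simp only [isCont, List.getD_cons_succ, List.getD_cons_zero]
        split <;> simp
    | succ j' =>
      simp only [List.getD_cons_succ]
      rw [pvGid_succ_pos rest 0 j' (by simp at h; omega)]
      simp [isCont]

theorem gid_mono (tk : List String) (j k : Nat) (hjk : j ≤ k) (hk : k < tk.length) :
    (pvGid 0 0 tk).getD j 0 ≤ (pvGid 0 0 tk).getD k 0 := by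
  induction k with
  | zero => have : j = 0 := by omega
            simp [this]
  | succ k' ih =>
    rcases Nat.lt_or_ge j (k' + 1) with hlt | hge
    · have h1 : (pvGid 0 0 tk).getD j 0 ≤ (pvGid 0 0 tk).getD k' 0 :=
        ih (by omega) (by omega)
      rw [gid_succ tk k' hk]
      split <;> omega
    · have : j = k' + 1 := by omega
      simp [this]

theorem gid_succ_eq_iff (tk : List String) (j : Nat) (h : j + 1 < tk.length) :
    (pvGid 0 0 tk).getD (j + 1) 0 = (pvGid 0 0 tk).getD j 0 ↔ isCont tk (j + 1) = true := by
  by_cases hs : isCont tk (j + 1) = true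
  · rw [gid_succ tk j h, if_pos hs]
    simp [hs]
  · rw [gid_succ tk j h, if_neg hs]
    constructor
    · intro he; omega
    · intro hic; exact absurd hic hs

theorem fch_iff (bp : List Int) (tk : List String) (j : Nat) (hj : j < tk.length) :
    fch bp tk j = true ↔
    ∃ k, k ≤ j ∧ bp.getD k 0 = 1 ∧ (pvGid 0 0 tk).getD k 0 = (pvGid 0 0 tk).getD j 0 := by
  induction j with
  | zero =>
    constructor
    · intro h
      exact ⟨0, le_refl _, by simpa [fch, List.getD_eq_getElem?_getD] using h, rfl⟩
    · intro ⟨k, hk, h1, _⟩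
      interval_cases k
      simpa [fch, List.getD_eq_getElem?_getD] using h1
  | succ j ih =>
    have hj' : j < tk.length := by omega
    constructor
    · intro h
      have h' : bp[j + 1]?.getD 0 = 1 ∨ (isCont tk (j + 1) = true ∧ fch bp tk j = true) := by
        simpa [fch] using h
      rcases h' with h1 | ⟨hic, hfj⟩
      · exact ⟨j + 1, le_refl _, by simpa [List.getD_eq_getElem?_getD] using h1, rfl⟩
      · obtain ⟨k, hk, hb1, hg⟩ := (ih hj').mp hfj
        exact ⟨k, by omega, hb1, by rw [hg, (gid_succ_eq_iff tk j hj).mpr hic]⟩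
    · intro ⟨k, hk, h1, hg⟩
      by_cases hkj : k = j + 1
      · subst hkj
        simp [fch, List.getD_eq_getElem?_getD] at h1 ⊢
        exact Or.inl h1
      · have hkle : k ≤ j := by omega
        have hmono1 : (pvGid 0 0 tk).getD k 0 ≤ (pvGid 0 0 tk).getD j 0 :=
          gid_mono tk k j hkle hj'
        have hmono2 : (pvGid 0 0 tk).getD j 0 ≤ (pvGid 0 0 tk).getD (j + 1) 0 :=
          gid_mono tk j (j + 1) (by omega) hj
        have hgje : (pvGid 0 0 tk).getD (j + 1) 0 = (pvGid 0 0 tk).getD j 0 := by omega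
        have hic : isCont tk (j + 1) = true := (gid_succ_eq_iff tk j hj).mp hgje
        have hfj : fch bp tk j = true := (ih hj').mpr ⟨k, hkle, h1, by omega⟩
        simp [fch, hic, hfj]

-- combined characterisation: forward-or-backward reachability = some 1 in the same group
theorem chain_iff_group (bp : List Int) (tk : List String) (j : Nat) (hj : j < tk.length) :
    (fch bp tk j = true ∨ bch bp tk j = true) ↔
    ∃ k, k < tk.length ∧ bp.getD k 0 = 1 ∧ (pvGid 0 0 tk).getD k 0 = (pvGid 0 0 tk).getD j 0 := by
  suffices H : ∀ d j, j < tk.length → tk.length - 1 - j = d →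
      ((fch bp tk j = true ∨ bch bp tk j = true) ↔
        ∃ k, k < tk.length ∧ bp.getD k 0 = 1 ∧
          (pvGid 0 0 tk).getD k 0 = (pvGid 0 0 tk).getD j 0) from H _ j hj rfl
  intro d
  induction d with
  | zero =>
    intro j hjm hd
    have hbf : bch bp tk j = false := by
      cases hb : bch bp tk j
      · rfl
      · exact absurd (bch_lt bp tk j hb) (by omega)
    rw [hbf]
    simp only [Bool.false_eq_true, or_false]
    rw [fch_iff bp tk j hjm]
    constructor
    · intro ⟨k, hk, h1, hg⟩
      exact ⟨k, by omega, h1, hg⟩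
    · intro ⟨k, hk, h1, hg⟩
      exact ⟨k, by omega, h1, hg⟩
  | succ d ih =>
    intro j hjm hd
    have hj1 : j + 1 < tk.length := by omega
    have hbu := bch_unfold_pos bp tk j hj1
    constructor
    · intro h
      rcases h with hf | hb
      · obtain ⟨k, hk, h1, hg⟩ := (fch_iff bp tk j hjm).mp hf
        exact ⟨k, by omega, h1, hg⟩
      · rw [hbu] at hb
        obtain ⟨hic, hor⟩ := Bool.and_eq_true_iff.mp hb
        have hrec := ih (j + 1) hj1 (by omega)
        obtain ⟨k, hk, h1, hg⟩ := hrec.mp (by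
          rcases Bool.or_eq_true_iff.mp hor with h' | h'
          · exact Or.inl h'
          · exact Or.inr h')
        exact ⟨k, hk, h1, by rw [hg, (gid_succ_eq_iff tk j hj1).mpr hic]⟩
    · intro ⟨k, hk, h1, hg⟩
      by_cases hkj : k ≤ j
      · exact Or.inl ((fch_iff bp tk j hjm).mpr ⟨k, hkj, h1, hg⟩)
      · have hkj1 : j + 1 ≤ k := by omega
        have hmono1 : (pvGid 0 0 tk).getD j 0 ≤ (pvGid 0 0 tk).getD (j + 1) 0 :=
          gid_mono tk j (j + 1) (by omega) hj1
        have hmono2 : (pvGid 0 0 tk).getD (j + 1) 0 ≤ (pvGid 0 0 tk).getD k 0 :=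
          gid_mono tk (j + 1) k hkj1 hk
        have hgje : (pvGid 0 0 tk).getD (j + 1) 0 = (pvGid 0 0 tk).getD j 0 := by omega
        have hic : isCont tk (j + 1) = true := (gid_succ_eq_iff tk j hj1).mp hgje
        have hrec := ih (j + 1) hj1 (by omega)
        have hside := hrec.mpr ⟨k, hk, h1, by omega⟩
        refine Or.inr ?_
        rw [hbu]
        refine Bool.and_eq_true_iff.mpr ⟨hic, ?_⟩
        rcases hside with h' | h'
        · simp [h']
        · simp [h']

-- hot-set membership
theorem hot_mem (bp : List Int) (tk : List String) (v : Int) :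
    PySem.Set.contains
      ((List.range tk.length).foldl
        (fun (s : PySem.Set Int) i =>
          if bp.getD i 0 == 1 then PySem.Set.add s ((pvGid 0 0 tk).getD i 0) else s)
        PySem.Set.empty) v = true ↔
    ∃ i, i < tk.length ∧ bp.getD i 0 = 1 ∧ (pvGid 0 0 tk).getD i 0 = v := by
  suffices H : ∀ t, PySem.Set.contains
      ((List.range t).foldl
        (fun (s : PySem.Set Int) i =>
          if bp.getD i 0 == 1 then PySem.Set.add s ((pvGid 0 0 tk).getD i 0) else s)
        PySem.Set.empty) v = true ↔
      ∃ i, i < t ∧ bp.getD i 0 = 1 ∧ (pvGid 0 0 tk).getD i 0 = v from H tk.length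
  intro t
  induction t with
  | zero =>
    simp [PySem.Set.empty]
  | succ t ih =>
    rw [List.range_succ, List.foldl_append, List.foldl_cons, List.foldl_nil]
    by_cases hb : (bp.getD t 0 == 1) = true
    · rw [if_pos hb]
      rw [PySem.Set.contains_iff, PySem.Set.mem_add, ← PySem.Set.contains_iff, ih]
      constructor
      · intro h
        rcases h with ⟨i, hi, h1, hg⟩ | he
        · exact ⟨i, by omega, h1, hg⟩
        · exact ⟨t, by omega, beq_iff_eq.mp hb, he.symm⟩
      · intro ⟨i, hi, h1, hg⟩
        by_cases hit : i = t
        · exact Or.inr (by rw [← hg, hit])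
        · exact Or.inl ⟨i, by omega, h1, hg⟩
    · rw [if_neg hb, ih]
      constructor
      · intro ⟨i, hi, h1, hg⟩
        exact ⟨i, by omega, h1, hg⟩
      · intro ⟨i, hi, h1, hg⟩
        by_cases hit : i = t
        · exact absurd (beq_iff_eq.mpr (hit ▸ h1)) hb
        · exact ⟨i, by omega, h1, hg⟩

-- elementwise value of B
theorem alt_getD (bp : List Int) (tk : List String) (j : Nat) (hj : j < bp.length) :
    (expand_subword_highlights_alt bp tk).getD j 0 =
      if j < tk.length ∧ ∃ k, k < tk.length ∧ bp.getD k 0 = 1 ∧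
          (pvGid 0 0 tk).getD k 0 = (pvGid 0 0 tk).getD j 0
      then 1 else bp.getD j 0 := by
  unfold expand_subword_highlights_alt
  simp only []
  rw [List.getD_eq_getElem?_getD, List.getElem?_map, PySem.List.getElem?_enumerate,
    List.getElem?_eq_getElem hj]
  simp only [Option.map_some, Option.getD_some, Int.zero_add]
  have htn : ((j : Int)).toNat = j := rfl
  by_cases hjm : j < tk.length
  · have hdec : decide ((j : Int) < (tk.length : Int)) = true := by
      simp only [decide_eq_true_eq]
      exact_mod_cast hjm
    rw [hdec, htn, Bool.true_and]
    by_cases hex : ∃ k, k < tk.length ∧ bp.getD k 0 = 1 ∧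
        (pvGid 0 0 tk).getD k 0 = (pvGid 0 0 tk).getD j 0
    · rw [if_pos ((hot_mem bp tk _).mpr hex), if_pos ⟨hjm, hex⟩]
    · rw [if_neg (fun hc => hex ((hot_mem bp tk _).mp hc)), if_neg (fun hc => hex hc.2)]
      rw [List.getD_eq_getElem?_getD, List.getElem?_eq_getElem hj]
      rfl
  · have hdec : decide ((j : Int) < (tk.length : Int)) = false := by
      simp only [decide_eq_false_iff_not]
      intro hc
      exact hjm (by exact_mod_cast hc)
    rw [hdec, Bool.false_and, if_neg Bool.false_ne_true, if_neg (fun hc => hjm hc.1)]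
    rw [List.getD_eq_getElem?_getD, List.getElem?_eq_getElem hj]
    rfl

theorem alt_length (bp : List Int) (tk : List String) :
    (expand_subword_highlights_alt bp tk).length = bp.length := by
  unfold expand_subword_highlights_alt
  simp [PySem.List.length_enumerate]

theorem ext_getD (l1 l2 : List Int) (hl : l1.length = l2.length)
    (h : ∀ j, j < l1.length → l1.getD j 0 = l2.getD j 0) : l1 = l2 := by
  apply List.ext_getElem hl
  intro i h1 h2
  have := h i h1
  simpa [List.getD_eq_getElem?_getD, List.getElem?_eq_getElem, h1, h2] using this

-- ===== VERDICT (by name: the statement is the Claim_ definition above) =====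
theorem expand_subword_highlights_spec : Claim_equal_expand_subword_highlights := by
  intro bp tk _ hpre
  unfold Spec_expand_subword_highlights
  unfold Pre_expand_subword_highlights at hpre
  by_cases hm : tk.length = 0
  · have hA : expand_subword_highlights bp tk = bp := by
      unfold expand_subword_highlights
      simp [hm]
    rw [hA]
    refine ext_getD _ _ (alt_length bp tk).symm ?_
    intro j hj
    rw [alt_getD bp tk j hj, if_neg (fun hx => absurd hx.1 (by omega))]
  · have hm1 : 1 ≤ tk.length := by omega
    obtain ⟨hlenF, hgetF⟩ := fwd_inv bp tk hpre (tk.length - 1) (le_refl _)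
    set FW := (List.range' 1 (tk.length - 1)).foldl (pvFwdStep tk) bp with hFWdef
    have hFW' : ∀ j, FW.getD j 0 = if j < tk.length ∧ fch bp tk j then 1 else bp.getD j 0 := by
      intro j
      rw [hgetF j]
      by_cases hc : j < tk.length ∧ fch bp tk j = true
      · rw [if_pos hc, if_pos ⟨by omega, hc.2⟩]
      · rw [if_neg hc, if_neg (fun hx => hc ⟨by omega, hx.2⟩)]
    obtain ⟨hlenR, hgetR⟩ := bwd_inv bp tk hpre hm1 FW hlenF hFW' (tk.length - 1) (le_refl _)
    have hA : expand_subword_highlights bp tk =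
        ((List.range' (tk.length - 1 - (tk.length - 1)) (tk.length - 1)).reverse).foldl
          (pvBwdStep tk) FW := by
      unfold expand_subword_highlights
      rw [show tk.length - 1 - (tk.length - 1) = 0 from by omega, ← List.range_eq_range']
    rw [hA]
    refine ext_getD _ _ (by rw [hlenR, alt_length]) ?_
    intro j hj
    have hjbp : j < bp.length := by rwa [hlenR] at hj
    rw [hgetR j, alt_getD bp tk j hjbp, hFW' j]
    rw [show tk.length - 1 - (tk.length - 1) = 0 from by omega]
    simp only [Nat.zero_le, true_and]
    by_cases hjm : j < tk.length
    · have hiff := chain_iff_group bp tk j hjm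
      by_cases hex : fch bp tk j = true ∨ bch bp tk j = true
      · have hE := hiff.mp hex
        rcases hex with hf | hb
        · by_cases hbv : bch bp tk j = true
          · rw [if_pos hbv, if_pos ⟨hjm, hE⟩]
          · rw [if_neg hbv, if_pos ⟨hjm, hf⟩, if_pos ⟨hjm, hE⟩]
        · rw [if_pos hb, if_pos ⟨hjm, hE⟩]
      · have hfn : ¬ fch bp tk j = true := fun h => hex (Or.inl h)
        have hbn : ¬ bch bp tk j = true := fun h => hex (Or.inr h)
        rw [if_neg hbn, if_neg (fun hx => hfn hx.2), if_neg (fun hx => hex (hiff.mpr hx.2))]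
    · have hbn : bch bp tk j = false := by
        cases hb : bch bp tk j
        · rfl
        · exact absurd (bch_lt bp tk j hb) (by omega)
      rw [if_neg (by rw [hbn]; exact Bool.false_ne_true), if_neg (fun hx => hjm hx.1),
        if_neg (fun hx => hjm hx.1)]
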